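-- pv_equiv track=rewrite | github.com/Slugten/Data_Analytics_Python_Github | Module 2 Data-Functions-Loop-Conditionals/for/main.py | alphabet_set
-- ===== SOURCE A (Python) =====
-- def alphabet_set(country_list):
--     alphabet = list('abcdefghijklmnopqrstuvwxyz')
--     countries_lowercase = [country.lower() for country in country_list]
--     short_name_list = []
--     used_letters = []
--
--     for country in countries_lowercase:
--
--         for letter in country:
--
--             if letter in alphabet:
--                 alphabet.remove(letter)
--
--                 if country not in short_name_list:
--                     short_name_list.append(country)
--
--                     if len(used_letters) == 26 and len(short_name_list) <= 14:
--                         break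
--
--     return short_name_list
-- ===== SOURCE B (Python) =====
-- def alphabet_set(country_list):
--     short_name_list = []
--     prefix = []
--     for country in country_list:
--         c = country.lower()
--         if any('a' <= ch <= 'z' and all(ch not in prev for prev in prefix) for ch in c):
--             short_name_list.append(c)
--         prefix.append(c)
--     return short_name_list
-- ===== Notes on version B (the rewrite author's own statement) =====
-- stated objective: simpler
-- what changed: B drops A's depleting-alphabet state, per-letter list.remove and in-list dedup check; it keeps a lowered country iff it contains an a-z letter absent from every earlier lowered country, a stateless predicate over the prefix of previous countries.
import Mathlib
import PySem

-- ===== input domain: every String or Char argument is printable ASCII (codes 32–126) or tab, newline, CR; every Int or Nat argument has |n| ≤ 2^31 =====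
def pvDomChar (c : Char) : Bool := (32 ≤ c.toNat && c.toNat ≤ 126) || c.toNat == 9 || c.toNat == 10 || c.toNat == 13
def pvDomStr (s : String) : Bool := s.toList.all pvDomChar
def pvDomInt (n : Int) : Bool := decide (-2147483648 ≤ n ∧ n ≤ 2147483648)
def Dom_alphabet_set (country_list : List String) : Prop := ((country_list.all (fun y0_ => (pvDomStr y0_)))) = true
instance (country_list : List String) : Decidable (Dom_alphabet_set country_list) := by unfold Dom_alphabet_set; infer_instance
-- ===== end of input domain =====

-- B replaces A's depleting-alphabet state and dedup check with a stateless predicate over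
-- the prefix of previously seen lowered countries (objective: simpler).

-- ===== PORT A =====
-- inner 'for letter in country' loop of A; returns the updated (alphabet, short_name_list).
-- used_letters is threaded unchanged (A never appends to it).
def alphabetInner (letters : List Char) (alphabet : List Char) (snl : List String)
    (used : List Char) (country : String) : List Char × List String :=
  match letters with
  | [] => (alphabet, snl)
  | letter :: rest =>
    if letter ∈ alphabet then
      -- Python list.remove; guarded by the membership test so it never raises
      let alphabet' := (PySem.List.remove? alphabet letter).getD alphabet
      if country ∉ snl then
        let snl' := snl ++ [country]
        if used.length = 26 ∧ snl'.length ≤ 14 then (alphabet', snl')  -- break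
        else alphabetInner rest alphabet' snl' used country
      else alphabetInner rest alphabet' snl used country
    else alphabetInner rest alphabet snl used country

-- outer 'for country in countries_lowercase' loop of A
def alphabetOuter (countries : List String) (alphabet : List Char) (snl : List String)
    (used : List Char) : List String :=
  match countries with
  | [] => snl
  | country :: rest =>
    let st := alphabetInner country.toList alphabet snl used country
    alphabetOuter rest st.1 st.2 used

def alphabet_set (country_list : List String) : List String :=
  let alphabet := "abcdefghijklmnopqrstuvwxyz".toList
  let countries_lowercase := country_list.map (fun country => PySem.Str.lower country)
  alphabetOuter countries_lowercase alphabet [] []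

-- ===== PORT B =====
-- loop of B: prefix holds the lowered countries already seen
def altLoop (countries : List String) (snl : List String) (prefix_ : List String) : List String :=
  match countries with
  | [] => snl
  | country :: rest =>
    let c := PySem.Str.lower country
    let snl' := if c.toList.any (fun ch =>
        ('a' ≤ ch && ch ≤ 'z') && prefix_.all (fun prev => !(prev.toList.contains ch)))
      then snl ++ [c] else snl
    altLoop rest snl' (prefix_ ++ [c])

def alphabet_set_alt (country_list : List String) : List String :=
  altLoop country_list [] []

-- ===== PRECONDITION & SPEC =====
def Spec_alphabet_set (country_list : List String) (out : List String) : Prop := out = alphabet_set_alt country_list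
instance (country_list : List String) (out : List String) : Decidable (Spec_alphabet_set country_list out) := by unfold Spec_alphabet_set; infer_instance

-- ===== CLAIM (what is proved, stated in full; the proofs are below) =====
def Claim_equal_alphabet_set : Prop := ∀ (country_list : List String), Dom_alphabet_set country_list → Spec_alphabet_set country_list (alphabet_set country_list)

-- ===== LEMMAS AND PROOFS =====

-- membership in the literal alphabet string is exactly the 'a' ≤ c ≤ 'z' test
lemma mem_base26 (c : Char) :
    c ∈ "abcdefghijklmnopqrstuvwxyz".toList ↔ ('a' ≤ c ∧ c ≤ 'z') := by
  have h : "abcdefghijklmnopqrstuvwxyz".toList =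
      ['a','b','c','d','e','f','g','h','i','j','k','l','m',
       'n','o','p','q','r','s','t','u','v','w','x','y','z'] := by decide
  rw [h]
  simp only [List.mem_cons, List.not_mem_nil, or_false, Char.ext_iff, Char.le_def,
    UInt32.le_iff_toNat_le, UInt32.ext_iff, show ('a').val.toNat = 97 from rfl, show ('b').val.toNat = 98 from rfl, show ('c').val.toNat = 99 from rfl, show ('d').val.toNat = 100 from rfl, show ('e').val.toNat = 101 from rfl, show ('f').val.toNat = 102 from rfl, show ('g').val.toNat = 103 from rfl, show ('h').val.toNat = 104 from rfl, show ('i').val.toNat = 105 from rfl, show ('j').val.toNat = 106 from rfl, show ('k').val.toNat = 107 from rfl, show ('l').val.toNat = 108 from rfl, show ('m').val.toNat = 109 from rfl, show ('n').val.toNat = 110 from rfl, show ('o').val.toNat = 111 from rfl, show ('p').val.toNat = 112 from rfl, show ('q').val.toNat = 113 from rfl, show ('r').val.toNat = 114 from rfl, show ('s').val.toNat = 115 from rfl, show ('t').val.toNat = 116 from rfl, show ('u').val.toNat = 117 from rfl, show ('v').val.toNat = 118 from rfl, show ('w').val.toNat = 119 from rfl, show ('x').val.toNat = 120 from rfl,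 show ('y').val.toNat = 121 from rfl, show ('z').val.toNat = 122 from rfl]
  omega

lemma nodup_base26 : ("abcdefghijklmnopqrstuvwxyz".toList).Nodup := by decide

-- net effect of A's inner loop
lemma alphabetInner_eq (letters : List Char) (alphabet : List Char) (snl : List String)
    (country : String) (hnd : alphabet.Nodup) :
    alphabetInner letters alphabet snl [] country =
      (alphabet.filter (fun ch => ch ∉ letters),
       if (∃ ch ∈ letters, ch ∈ alphabet) ∧ country ∉ snl then snl ++ [country] else snl) := by
  induction letters generalizing alphabet snl with
  | nil => simp [alphabetInner]
  | cons letter rest ih =>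
    by_cases hm : letter ∈ alphabet
    · have hrem : (PySem.List.remove? alphabet letter).getD alphabet = alphabet.erase letter := by
        rw [PySem.List.remove?_eq_some_erase _ _ hm]; rfl
      have hera : alphabet.erase letter = alphabet.filter (fun x => x != letter) :=
        List.Nodup.erase_eq_filter hnd letter
      have hnd' : (alphabet.erase letter).Nodup := hnd.erase letter
      have hfilt : (alphabet.erase letter).filter (fun ch => ch ∉ rest)
          = alphabet.filter (fun ch => ch ∉ letter :: rest) := by
        rw [hera, List.filter_filter]
        apply List.filter_congr
        intro x _
        by_cases hx : x = letter <;> simp [hx]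
      by_cases hc : country ∈ snl
      · have h1 : ¬ ((∃ ch ∈ rest, ch ∈ alphabet.erase letter) ∧ country ∉ snl) := by
          intro h; exact h.2 hc
        have hL : ¬ ((∃ ch ∈ letter :: rest, ch ∈ alphabet) ∧ country ∉ snl) := by
          intro h; exact h.2 hc
        rw [show alphabetInner (letter :: rest) alphabet snl [] country
            = alphabetInner rest ((PySem.List.remove? alphabet letter).getD alphabet) snl [] country from by
          simp only [alphabetInner, if_pos hm, if_neg (not_not_intro hc)]]
        rw [hrem, ih _ _ hnd', if_neg h1, if_neg hL, hfilt]
      · have hbrk : ¬ (([] : List Char).length = 26 ∧ (snl ++ [country]).length ≤ 14) := by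
          simp
        rw [show alphabetInner (letter :: rest) alphabet snl [] country
            = alphabetInner rest ((PySem.List.remove? alphabet letter).getD alphabet) (snl ++ [country]) [] country from by
          simp only [alphabetInner, if_pos hm, if_pos hc, if_neg hbrk]]
        rw [hrem, ih _ _ hnd']
        have hmem : country ∈ snl ++ [country] := by simp
        have h1 : ¬ ((∃ ch ∈ rest, ch ∈ alphabet.erase letter) ∧ country ∉ snl ++ [country]) := by
          intro h; exact h.2 hmem
        rw [if_neg h1, hfilt]
        have hR : (∃ ch ∈ letter :: rest, ch ∈ alphabet) ∧ country ∉ snl :=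
          ⟨⟨letter, by simp, hm⟩, hc⟩
        rw [if_pos hR]
    · simp only [alphabetInner, if_neg hm]
      rw [ih _ _ hnd]
      have hfilt : alphabet.filter (fun ch => ch ∉ rest)
          = alphabet.filter (fun ch => ch ∉ letter :: rest) := by
        apply List.filter_congr
        intro x hx
        have : x ≠ letter := fun h => hm (h ▸ hx)
        simp [this]
      have hiff : ((∃ ch ∈ rest, ch ∈ alphabet) ∧ country ∉ snl)
          ↔ ((∃ ch ∈ letter :: rest, ch ∈ alphabet) ∧ country ∉ snl) := by
        constructor
        · rintro ⟨⟨ch, h1, h2⟩, h3⟩; exact ⟨⟨ch, by simp [h1], h2⟩, h3⟩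
        · rintro ⟨⟨ch, h1, h2⟩, h3⟩
          rcases List.mem_cons.1 h1 with h | h
          · exact absurd (h ▸ h2) hm
          · exact ⟨⟨ch, h, h2⟩, h3⟩
      rw [hfilt]
      by_cases hcond : (∃ ch ∈ rest, ch ∈ alphabet) ∧ country ∉ snl
      · rw [if_pos hcond, if_pos (hiff.1 hcond)]
      · rw [if_neg hcond, if_neg (fun h => hcond (hiff.2 h))]

-- the B-side predicate coincides with membership in A's remaining alphabet
lemma cond_eq (prefix_ : List String) (c : String) :
    (c.toList.any (fun ch =>
        ('a' ≤ ch && ch ≤ 'z') && prefix_.all (fun prev => !(prev.toList.contains ch))) = true)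
      ↔ (∃ ch ∈ c.toList,
          ch ∈ ("abcdefghijklmnopqrstuvwxyz".toList).filter
            (fun ch => prefix_.all (fun prev => !(prev.toList.contains ch)))) := by
  simp only [List.any_eq_true, List.mem_filter, mem_base26]
  constructor
  · rintro ⟨ch, h1, h2⟩
    simp only [Bool.and_eq_true, decide_eq_true_eq] at h2
    exact ⟨ch, h1, ⟨h2.1.1, h2.1.2⟩, h2.2⟩
  · rintro ⟨ch, h1, ⟨h2, h3⟩, h4⟩
    exact ⟨ch, h1, by simp only [Bool.and_eq_true, decide_eq_true_eq]; exact ⟨⟨h2, h3⟩, h4⟩⟩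

-- main loop correspondence
lemma outer_eq_alt (countries : List String) (prefix_ : List String) (snl : List String)
    (hsub : ∀ s ∈ snl, s ∈ prefix_) :
    alphabetOuter (countries.map (fun country => PySem.Str.lower country))
        (("abcdefghijklmnopqrstuvwxyz".toList).filter
          (fun ch => prefix_.all (fun prev => !(prev.toList.contains ch))))
        snl []
      = altLoop countries snl prefix_ := by
  induction countries generalizing prefix_ snl with
  | nil => simp [alphabetOuter, altLoop]
  | cons country rest ih =>
    set c := PySem.Str.lower country with hc
    set al := ("abcdefghijklmnopqrstuvwxyz".toList).filter
        (fun ch => prefix_.all (fun prev => !(prev.toList.contains ch))) with hal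
    have hnd : al.Nodup := nodup_base26.filter _
    simp only [List.map_cons, alphabetOuter, altLoop]
    rw [alphabetInner_eq c.toList al snl c hnd]
    have hfilt : al.filter (fun ch => ch ∉ c.toList)
        = ("abcdefghijklmnopqrstuvwxyz".toList).filter
            (fun ch => (prefix_ ++ [c]).all (fun prev => !(prev.toList.contains ch))) := by
      rw [hal, List.filter_filter]
      apply List.filter_congr
      intro x _
      simp [List.all_append, Bool.and_comm]
    by_cases hcond : c.toList.any (fun ch =>
        ('a' ≤ ch && ch ≤ 'z') && prefix_.all (fun prev => !(prev.toList.contains ch))) = true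
    · have hex : ∃ ch ∈ c.toList, ch ∈ al := (cond_eq prefix_ c).1 hcond
      have hnotin : c ∉ snl := by
        intro hmem
        obtain ⟨ch, hch, hchal⟩ := hex
        have hcp : c ∈ prefix_ := hsub c hmem
        rw [hal, List.mem_filter] at hchal
        have := List.all_eq_true.1 hchal.2 c hcp
        simp at this
        exact this hch
      rw [if_pos ⟨hex, hnotin⟩, if_pos hcond, hfilt]
      exact ih (prefix_ ++ [c]) (snl ++ [c])
        (fun s hs => by rcases List.mem_append.1 hs with h | h
                        · exact List.mem_append.2 (Or.inl (hsub s h))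
                        · simp at h; simp [h])
    · have hnex : ¬ ((∃ ch ∈ c.toList, ch ∈ al) ∧ c ∉ snl) := by
        rintro ⟨hex, _⟩
        exact hcond ((cond_eq prefix_ c).2 hex)
      rw [if_neg hnex, if_neg hcond, hfilt]
      exact ih (prefix_ ++ [c]) snl
        (fun s hs => List.mem_append.2 (Or.inl (hsub s hs)))

-- ===== VERDICT (by name: the statement is the Claim_ definition above) =====
theorem alphabet_set_spec : Claim_equal_alphabet_set := by
  intro country_list _
  unfold Spec_alphabet_set alphabet_set alphabet_set_alt
  have h := outer_eq_alt country_list [] [] (by simp)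
  simpa using h
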